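-- pv_equiv track=rewrite | github.com/unt-libraries/catalog-api | django/sierra/blacklight/parsers.py | find_names_in_string
-- ===== SOURCE A (Python) =====
-- def find_names_in_string(string):
--     """
--     Return a list of word-lists, where each word-list represents a
--     proper name found in the input `string`. This is designed to pull
--     name candidates out of a statement-of-responsibility string for
--     matching against name headings. Names found via this function do
--     not include any lowercase words, e.g., ['Ludwig', 'Beethoven'].
--     """
--     def push_word_to_name(word, name, names):
--         word = ''.join(word)
--         if word.islower():
--             if name and word == 'and':
--                 names.append(name)
--                 name = []
--         else:
--             name.append(word)
--         return names, name
--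
--     names, name, word = [], [], []
--     for ch in string:
--         if ch.isupper():
--             if word:
--                 names, name = push_word_to_name(word, name, names)
--             word = [ch]
--         elif ch.isalpha() or ch == '\'' or ord(ch) > 127:
--             word.append(ch)
--         else:
--             if word:
--                 names, name = push_word_to_name(word, name, names)
--                 word = []
--             if ch not in (' ', '.') and name:
--                 names.append(name)
--                 name = []
--     if word:
--         names, name = push_word_to_name(word, name, names)
--     if name:
--         names.append(name)
--     return names
-- ===== SOURCE B (Python) =====
-- def find_names_in_string(string):
--     """
--     Return a list of word-lists, where each word-list represents a
--     proper name found in the input `string`.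
--
--     Two-pass re-implementation: first tokenize the string into words
--     and separator-run markers (soft = only spaces/dots, hard = any
--     other separator char), then fold the token list into names.
--     """
--     # Pass 1: tokenize.
--     tokens = []
--     word = []
--     sep = None  # pending separator run: None, or True (hard) / False (soft)
--     for ch in string:
--         if ch.isupper() or ch.isalpha() or ch == '\'' or ord(ch) > 127:
--             if sep is not None:
--                 tokens.append(('s', sep))
--                 sep = None
--             if ch.isupper() and word:
--                 tokens.append(('w', ''.join(word)))
--                 word = [ch]
--             else:
--                 word.append(ch)
--         else:
--             if word:
--                 tokens.append(('w', ''.join(word)))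
--                 word = []
--             hard = ch not in (' ', '.')
--             sep = hard if sep is None else (sep or hard)
--     if word:
--         tokens.append(('w', ''.join(word)))
--     # (a trailing separator run is dropped: it can only close the current
--     # name, which the final flush below does anyway)
--
--     # Pass 2: fold tokens into names.
--     names, name = [], []
--     for kind, val in tokens:
--         if kind == 'w':
--             if val.islower():
--                 if name and val == 'and':
--                     names.append(name)
--                     name = []
--             else:
--                 name.append(val)
--         elif val and name:  # hard separator run closes the current name
--             names.append(name)
--             name = []
--     if name:
--         names.append(name)
--     return names
-- ===== Notes on version B (the rewrite author's own statement) =====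
-- stated objective: alternative
-- what changed: Replaces A's single interleaved character loop (with its nested push_word_to_name closure and eager per-character name breaking) by two passes: a tokenizer that emits words and coalesced separator-run markers (soft vs hard), then a fold over the token list that builds the names.
import Mathlib
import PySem

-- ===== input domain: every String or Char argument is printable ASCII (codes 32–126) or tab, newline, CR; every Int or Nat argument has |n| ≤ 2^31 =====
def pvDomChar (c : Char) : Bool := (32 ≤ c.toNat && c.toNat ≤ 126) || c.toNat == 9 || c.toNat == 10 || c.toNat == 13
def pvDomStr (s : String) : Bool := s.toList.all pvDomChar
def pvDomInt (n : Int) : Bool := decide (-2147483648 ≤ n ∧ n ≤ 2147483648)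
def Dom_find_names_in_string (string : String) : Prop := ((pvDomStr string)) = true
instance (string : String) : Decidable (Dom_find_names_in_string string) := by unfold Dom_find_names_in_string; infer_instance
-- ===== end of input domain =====

-- B replaces A's single interleaved character loop by a tokenize-then-fold decomposition
-- (alternative structure, same complexity).

-- hand port of str.islower() (no PySem strIslower): exact on the printable-ASCII domain,
-- where the cased characters are exactly the upper-/lowercase letters
def pvIslower (cs : List Char) : Bool :=
  cs.any PySem.Chars.islower && !(cs.any PySem.Chars.isupper)

-- ===== PORT A =====
def pvPushWord (word : List Char) (name : List String) (names : List (List String)) :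
    List (List String) × List String :=
  if pvIslower word then
    if name ≠ [] ∧ word = ['a', 'n', 'd'] then (names ++ [name], []) else (names, name)
  else (names, name ++ [String.ofList word])

def pvAStep (st : (List (List String) × List String) × List Char) (ch : Char) :
    (List (List String) × List String) × List Char :=
  match st with
  | ((names, name), word) =>
    if PySem.Chars.isupper ch then
      ((if word ≠ [] then pvPushWord word name names else (names, name)), [ch])
    else if PySem.Chars.isalpha ch || ch == '\'' || decide (127 < ch.toNat) then
      ((names, name), word ++ [ch])
    else
      let p := if word ≠ [] then pvPushWord word name names else (names, name)
      ((if ch ≠ ' ' ∧ ch ≠ '.' ∧ p.2 ≠ [] then (p.1 ++ [p.2], ([] : List String)) else p), [])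

def find_names_in_string (string : String) : List (List String) :=
  let st := string.toList.foldl pvAStep (([], []), [])
  let p := if st.2 ≠ [] then pvPushWord st.2 st.1.2 st.1.1 else st.1
  if p.2 ≠ [] then p.1 ++ [p.2] else p.1

-- ===== PORT B =====
inductive PvTok : Type
  | word : List Char → PvTok
  | sep : Bool → PvTok

def pvSepTok : Option Bool → List PvTok
  | none => []
  | some h => [.sep h]

def pvTokStep (st : List PvTok × List Char × Option Bool) (ch : Char) :
    List PvTok × List Char × Option Bool :=
  match st with
  | (toks, word, sep) =>
    if PySem.Chars.isupper ch || PySem.Chars.isalpha ch || ch == '\'' || decide (127 < ch.toNat) then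
      let toks := toks ++ pvSepTok sep
      if PySem.Chars.isupper ch ∧ word ≠ [] then (toks ++ [.word word], [ch], none)
      else (toks, word ++ [ch], none)
    else
      let toks := if word ≠ [] then toks ++ [.word word] else toks
      let h := decide (ch ≠ ' ' ∧ ch ≠ '.')
      (toks, [], some (match sep with | some h0 => h0 || h | none => h))

def pvConsume (st : List (List String) × List String) (t : PvTok) :
    List (List String) × List String :=
  match t with
  | .word w =>
    if pvIslower w then
      if st.2 ≠ [] ∧ w = ['a', 'n', 'd'] then (st.1 ++ [st.2], []) else st
    else (st.1, st.2 ++ [String.ofList w])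
  | .sep h => if h ∧ st.2 ≠ [] then (st.1 ++ [st.2], []) else st

def find_names_in_string_alt (string : String) : List (List String) :=
  let t := string.toList.foldl pvTokStep ([], [], none)
  let tokens := if t.2.1 ≠ [] then t.1 ++ [.word t.2.1] else t.1
  let p := tokens.foldl pvConsume ([], [])
  if p.2 ≠ [] then p.1 ++ [p.2] else p.1

-- ===== PRECONDITION & SPEC =====
def Spec_find_names_in_string (string : String) (out : List (List String)) : Prop := out = find_names_in_string_alt string
instance (string : String) (out : List (List String)) : Decidable (Spec_find_names_in_string string out) := by unfold Spec_find_names_in_string; infer_instance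

-- ===== CLAIM (what is proved, stated in full; the proofs are below) =====
def Claim_equal_find_names_in_string : Prop := ∀ (string : String), Dom_find_names_in_string string → Spec_find_names_in_string string (find_names_in_string string)

-- ===== LEMMAS AND PROOFS =====

/-- Invariant linking A's loop state to B's tokenizer state: same current word,
a pending separator only when the word is empty, and replaying the tokens
(plus the pending separator marker) rebuilds A's (names, name). -/
def pvR (a : (List (List String) × List String) × List Char)
    (b : List PvTok × List Char × Option Bool) : Prop :=
  b.2.1 = a.2 ∧ (a.2 ≠ [] → b.2.2 = none) ∧
    (b.1 ++ pvSepTok b.2.2).foldl pvConsume ([], []) = a.1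

theorem pvConsume_sep_sep (st : List (List String) × List String) (h0 h : Bool) :
    pvConsume (pvConsume st (.sep h0)) (.sep h) = pvConsume st (.sep (h0 || h)) := by
  rcases st with ⟨ns, nm⟩
  cases h0 <;> cases h <;> simp [pvConsume] <;> split_ifs <;> simp_all

theorem pvConsume_word (st : List (List String) × List String) (w : List Char) :
    pvConsume st (.word w) = pvPushWord w st.2 st.1 := by
  rcases st with ⟨ns, nm⟩
  simp [pvConsume, pvPushWord]

/-- A's separator handling IS one `pvConsume` of a hard/soft marker. -/
theorem pvSepA (p : List (List String) × List String) (ch : Char) :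
    (if ch ≠ ' ' ∧ ch ≠ '.' ∧ p.2 ≠ [] then (p.1 ++ [p.2], ([] : List String)) else p)
      = pvConsume p (.sep (decide (ch ≠ ' ' ∧ ch ≠ '.'))) := by
  rcases p with ⟨ns, nm⟩
  by_cases h1 : ch = ' ' <;> by_cases h2 : ch = '.' <;> by_cases h3 : nm = [] <;>
    simp [pvConsume, h1, h2, h3]

theorem pvR_step (a : (List (List String) × List String) × List Char)
    (b : List PvTok × List Char × Option Bool) (ch : Char) (h : pvR a b) :
    pvR (pvAStep a ch) (pvTokStep b ch) := by
  rcases a with ⟨⟨names, name⟩, word⟩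
  rcases b with ⟨toks, wordB, sep⟩
  rcases h with ⟨hw, hs, hf⟩
  simp only at hw hs hf
  subst hw
  by_cases hu : PySem.Chars.isupper ch = true
  · -- uppercase: A pushes the word (if any) and restarts it; B emits the same tokens
    have hb : (PySem.Chars.isupper ch || PySem.Chars.isalpha ch || ch == '\'' ||
        decide (127 < ch.toNat)) = true := by simp [hu]
    by_cases hword : wordB = []
    · subst hword
      have hA' : pvAStep ((names, name), ([] : List Char)) ch = ((names, name), [ch]) := by
        simp only [pvAStep]
        rw [if_pos hu, if_neg (fun hc => hc rfl)]
      have hB' : pvTokStep (toks, ([] : List Char), sep) ch =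
          (toks ++ pvSepTok sep, [ch], none) := by
        simp only [pvTokStep]
        rw [if_pos hb, if_neg (fun hc => hc.2 rfl)]
        rfl
      rw [hA', hB']
      exact ⟨rfl, fun _ => rfl, by simpa [pvSepTok] using hf⟩
    · have hn := hs hword; subst hn
      simp only [pvSepTok, List.append_nil] at hf
      have hA' : pvAStep ((names, name), wordB) ch = (pvPushWord wordB name names, [ch]) := by
        simp only [pvAStep]
        rw [if_pos hu, if_pos hword]
      have hB' : pvTokStep (toks, wordB, none) ch =
          (toks ++ [.word wordB], [ch], none) := by
        simp only [pvTokStep, pvSepTok, List.append_nil]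
        rw [if_pos hb, if_pos ⟨hu, hword⟩]
      rw [hA', hB']
      refine ⟨rfl, fun _ => rfl, ?_⟩
      simp [pvSepTok, List.foldl_append, hf, pvConsume_word]
  · by_cases ha : (PySem.Chars.isalpha ch || ch == '\'' || decide (127 < ch.toNat)) = true
    · -- non-uppercase word character: both just extend the current word
      have hb : (PySem.Chars.isupper ch || PySem.Chars.isalpha ch || ch == '\'' ||
          decide (127 < ch.toNat)) = true := by
        simp only [Bool.or_eq_true] at ha ⊢; tauto
      have hA' : pvAStep ((names, name), wordB) ch = ((names, name), wordB ++ [ch]) := by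
        simp only [pvAStep]
        rw [if_neg hu, if_pos ha]
      have hB' : pvTokStep (toks, wordB, sep) ch =
          (toks ++ pvSepTok sep, wordB ++ [ch], none) := by
        simp only [pvTokStep]
        rw [if_pos hb, if_neg (fun hc => hu hc.1)]
      rw [hA', hB']
      exact ⟨rfl, fun _ => rfl, by simpa [pvSepTok] using hf⟩
    · -- separator character
      have hbn : ¬((PySem.Chars.isupper ch || PySem.Chars.isalpha ch || ch == '\'' ||
          decide (127 < ch.toNat)) = true) := by
        simp only [Bool.or_eq_true] at ha ⊢; tauto
      by_cases hword : wordB = []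
      · subst hword
        have hA' : pvAStep ((names, name), ([] : List Char)) ch =
            (pvConsume (names, name) (.sep (decide (ch ≠ ' ' ∧ ch ≠ '.'))), []) := by
          simp only [pvAStep]
          rw [if_neg hu, if_neg ha,
            if_neg (show ¬(([] : List Char) ≠ []) from fun hc => hc rfl), pvSepA]
        cases sep with
        | none =>
          have hB' : pvTokStep (toks, ([] : List Char), none) ch =
              (toks, [], some (decide (ch ≠ ' ' ∧ ch ≠ '.'))) := by
            simp only [pvTokStep]
            rw [if_neg hbn, if_neg (fun hc => hc rfl)]
          rw [hA', hB']
          refine ⟨rfl, fun hc => absurd rfl hc, ?_⟩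
          simp only [pvSepTok, List.append_nil] at hf
          simp [pvSepTok, List.foldl_append, hf]
        | some h0 =>
          have hB' : pvTokStep (toks, ([] : List Char), some h0) ch =
              (toks, [], some (h0 || decide (ch ≠ ' ' ∧ ch ≠ '.'))) := by
            simp only [pvTokStep]
            rw [if_neg hbn, if_neg (fun hc => hc rfl)]
          rw [hA', hB']
          refine ⟨rfl, fun hc => absurd rfl hc, ?_⟩
          simp only [pvSepTok, List.foldl_append, List.foldl_cons, List.foldl_nil] at hf ⊢
          rw [← pvConsume_sep_sep, hf]
      · have hn := hs hword; subst hn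
        simp only [pvSepTok, List.append_nil] at hf
        have hA' : pvAStep ((names, name), wordB) ch =
            (pvConsume (pvPushWord wordB name names)
              (.sep (decide (ch ≠ ' ' ∧ ch ≠ '.'))), []) := by
          simp only [pvAStep]
          rw [if_neg hu, if_neg ha, if_pos hword, pvSepA]
        have hB' : pvTokStep (toks, wordB, none) ch =
            (toks ++ [.word wordB], [], some (decide (ch ≠ ' ' ∧ ch ≠ '.'))) := by
          simp only [pvTokStep]
          rw [if_neg hbn, if_pos hword]
        rw [hA', hB']
        refine ⟨rfl, fun hc => absurd rfl hc, ?_⟩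
        simp [pvSepTok, List.foldl_append, hf, pvConsume_word]

theorem pvR_foldl (cs : List Char) (a : (List (List String) × List String) × List Char)
    (b : List PvTok × List Char × Option Bool) (h : pvR a b) :
    pvR (cs.foldl pvAStep a) (cs.foldl pvTokStep b) := by
  induction cs generalizing a b with
  | nil => exact h
  | cons c cs ih => exact ih _ _ (pvR_step a b c h)

-- ===== VERDICT (by name: the statement is the Claim_ definition above) =====
theorem find_names_in_string_spec : Claim_equal_find_names_in_string := by
  intro s _
  unfold Spec_find_names_in_string find_names_in_string find_names_in_string_alt
  have h := pvR_foldl s.toList ((([], []), [])) (([], [], none))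
    ⟨rfl, fun hc => absurd rfl hc, rfl⟩
  set a := s.toList.foldl pvAStep (([], []), []) with hA
  set b := s.toList.foldl pvTokStep ([], [], none) with hB
  rcases a with ⟨⟨names, name⟩, wordB'⟩
  rcases b with ⟨toks, wordB, sep⟩
  rcases h with ⟨hw, hs, hf⟩
  simp only at hw hs hf ⊢
  subst hw
  by_cases hword : wordB = []
  · subst hword
    rw [if_neg (show ¬(([] : List Char) ≠ []) from fun hc => hc rfl),
      if_neg (show ¬(([] : List Char) ≠ []) from fun hc => hc rfl)]
    cases sep with
    | none =>
      simp only [pvSepTok, List.append_nil] at hf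
      rw [hf]
    | some h0 =>
      simp only [pvSepTok, List.foldl_append, List.foldl_cons, List.foldl_nil] at hf
      rcases hEq : toks.foldl pvConsume ([], []) with ⟨ns, nm⟩
      rw [hEq] at hf
      by_cases hc : h0 = true ∧ nm ≠ []
      · have hv : (ns ++ [nm], ([] : List String)) = (names, name) := by
          rw [← hf]
          simp only [pvConsume]
          rw [if_pos hc]
        injection hv with e1 e2
        subst e1; subst e2
        simp [hc.2]
      · have hv : (ns, nm) = (names, name) := by
          rw [← hf]
          simp only [pvConsume]
          rw [if_neg hc]
        injection hv with e1 e2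
        subst e1; subst e2
        rfl
  · have hn := hs hword; subst hn
    simp only [pvSepTok, List.append_nil] at hf
    rw [if_pos hword, if_pos hword, List.foldl_append, List.foldl_cons, List.foldl_nil,
      hf, pvConsume_word]
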